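-- pv_equiv track=rewrite | github.com/puszolek/python_scripts | chocolates.py | solution
-- ===== SOURCE A (Python) =====
-- def solution(N, M):
--
--     A = [1] * N
--     counter = 0
--
--     for i in range (0, len(A)):
--         if A[(i*M)%N] == 0:
--             break
--         else:
--             A[(i*M)%N] = 0
--             counter = counter + 1
--
--     return counter
--
--     pass
-- ===== SOURCE B (Python) =====
-- def solution(N, M):
--     # closed form: the jump sequence i*M % N revisits a cell after exactly N // gcd(N, M) steps
--     if N <= 0:
--         return 0
--     a, b = N, abs(M)
--     while b:
--         a, b = b, a % b
--     return N // a
-- ===== Notes on version B (the rewrite author's own statement) =====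
-- stated objective: faster
-- what changed: Replaces the O(N) array-marking jump simulation with the closed form N // gcd(N, M), gcd computed by an Euclidean loop.
import Mathlib
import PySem

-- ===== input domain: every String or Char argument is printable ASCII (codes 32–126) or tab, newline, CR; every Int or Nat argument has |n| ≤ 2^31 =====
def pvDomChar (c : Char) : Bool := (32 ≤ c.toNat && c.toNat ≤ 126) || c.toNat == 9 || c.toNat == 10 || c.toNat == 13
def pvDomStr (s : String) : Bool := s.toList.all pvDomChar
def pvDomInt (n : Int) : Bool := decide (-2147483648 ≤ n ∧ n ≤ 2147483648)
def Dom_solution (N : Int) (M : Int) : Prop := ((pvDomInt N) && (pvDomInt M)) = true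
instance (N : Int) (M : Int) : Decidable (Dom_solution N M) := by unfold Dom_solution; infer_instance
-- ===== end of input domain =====

-- B replaces A's O(N) array-marking jump simulation by the closed form N // gcd(N, M)
-- (gcd computed by a hand-written Euclidean loop); objective: faster.

-- ===== PORT A =====
-- the body of A's for-loop (break ported as a done flag); state = (A, counter, done)
def pvStep (N M : Int) (st : List Int × Int × Bool) (i : Int) : List Int × Int × Bool :=
  if st.2.2 then st
  else if PySem.List.pyGetD st.1 (PySem.Int.mod (i * M) N) 0 = 0 then
    (st.1, st.2.1, true)
  else
    (PySem.List.pySetD st.1 (PySem.Int.mod (i * M) N) 0, st.2.1 + 1, false)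

def solution (N : Int) (M : Int) : Int :=
  let A0 : List Int := List.replicate N.toNat 1   -- [1] * N (empty for N ≤ 0)
  ((PySem.List.pyRange 0 (A0.length : Int) 1).foldl (pvStep N M) (A0, 0, false)).2.1

-- ===== PORT B =====
-- while b: a, b = b, a % b
def gcdLoop (a b : Int) : Int :=
  if h : b = 0 then a
  else gcdLoop b (PySem.Int.mod a b)
termination_by b.natAbs
decreasing_by
  rcases lt_trichotomy b 0 with hb | hb | hb
  · have h1 := PySem.Int.mod_neg_bounds a hb
    omega
  · exact absurd hb h
  · have h1 := PySem.Int.mod_nonneg a hb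
    have h2 := PySem.Int.mod_lt a hb
    omega

def solution_alt (N : Int) (M : Int) : Int :=
  if N ≤ 0 then 0
  else PySem.Int.floordiv N (gcdLoop N |M|)

-- ===== PRECONDITION & SPEC =====
def Spec_solution (N : Int) (M : Int) (out : Int) : Prop := out = solution_alt N M
instance (N : Int) (M : Int) (out : Int) : Decidable (Spec_solution N M out) := by unfold Spec_solution; infer_instance

-- ===== CLAIM (what is proved, stated in full; the proofs are below) =====
def Claim_equal_solution : Prop := ∀ (N : Int) (M : Int), Dom_solution N M → Spec_solution N M (solution N M)

-- ===== LEMMAS AND PROOFS =====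

-- B's Euclidean loop computes gcd
lemma gcdLoop_eq : ∀ a b : Int, 0 ≤ a → 0 ≤ b → gcdLoop a b = (Int.gcd a b : Int) := by
  intro a b
  induction a, b using gcdLoop.induct with
  | case1 a =>
    intro ha _
    rw [gcdLoop]
    simp [Int.gcd, Int.natAbs_of_nonneg ha]
  | case2 a b h ih =>
    intro _ hb
    have hbpos : 0 < b := lt_of_le_of_ne hb (Ne.symm h)
    rw [gcdLoop, dif_neg h]
    rw [ih hb (PySem.Int.mod_nonneg a hbpos)]
    rw [PySem.Int.mod_eq_emod_of_pos hbpos]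
    rw [Int.gcd_comm b (a % b), Int.gcd_emod]

-- n ∣ d*m forces (n / gcd n m) ∣ d
lemma nat_core (n m d : Nat) (h : n ∣ d * m) (hn : 0 < n) : n / Nat.gcd n m ∣ d := by
  have hg : 0 < Nat.gcd n m := Nat.gcd_pos_of_pos_left m hn
  have heq : d * m = Nat.gcd n m * (d * (m / Nat.gcd n m)) := by
    rw [← Nat.mul_assoc, Nat.mul_comm (Nat.gcd n m) d, Nat.mul_assoc,
      Nat.mul_div_cancel' (Nat.gcd_dvd_right n m)]
  have h1 : Nat.gcd n m * (n / Nat.gcd n m) ∣ Nat.gcd n m * (d * (m / Nat.gcd n m)) := by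
    rw [Nat.mul_div_cancel' (Nat.gcd_dvd_left n m), ← heq]
    exact h
  exact (Nat.coprime_div_gcd_div_gcd hg).dvd_of_dvd_mul_right
    ((Nat.mul_dvd_mul_iff_left hg).mp h1)

-- no multiple d*M with 0 < d < N/gcd(N,M) is ≡ 0 (mod N)
lemma key_not_dvd (N M : Int) (hN : 0 < N) (d : Nat) (hd : 0 < d)
    (hdL : d < N.toNat / Int.gcd N M) : ¬ ((N : Int) ∣ (d : Int) * M) := by
  intro h
  have hnat : N.natAbs ∣ ((d : Int) * M).natAbs := Int.natAbs_dvd_natAbs.mpr h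
  rw [Int.natAbs_mul, Int.natAbs_natCast] at hnat
  have hab : N.natAbs = N.toNat := by omega
  rw [hab] at hnat
  have hgcd : Int.gcd N M = Nat.gcd N.toNat M.natAbs := by
    unfold Int.gcd
    rw [hab]
  have hdvd := nat_core N.toNat M.natAbs d hnat (by omega)
  rw [← hgcd] at hdvd
  have := Nat.le_of_dvd hd hdvd
  omega

-- N divides (N/gcd(N,M)) * M
lemma key_dvd (N M : Int) (hN : 0 < N) :
    (N : Int) ∣ ((N.toNat / Int.gcd N M : Nat) : Int) * M := by
  set g := Int.gcd N M with hgdef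
  have hab : N.natAbs = N.toNat := by omega
  have hgcd : g = Nat.gcd N.toNat M.natAbs := by rw [hgdef]; unfold Int.gcd; rw [hab]
  have hgn : g ∣ N.toNat := by rw [hgcd]; exact Nat.gcd_dvd_left _ _
  have hgm : g ∣ M.natAbs := by rw [hgcd]; exact Nat.gcd_dvd_right _ _
  rw [← Int.dvd_natAbs, Int.natAbs_mul, Int.natAbs_natCast]
  have hnatdvd : N.toNat ∣ N.toNat / g * M.natAbs := by
    obtain ⟨m', hm'⟩ := hgm
    rw [hm', ← Nat.mul_assoc, Nat.mul_comm (N.toNat / g) g, Nat.mul_div_cancel' hgn]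
    exact Nat.dvd_mul_right _ _
  calc (N : Int) = ((N.toNat : Nat) : Int) := by omega
    _ ∣ ((N.toNat / g * M.natAbs : Nat) : Int) := Int.natCast_dvd_natCast.mpr hnatdvd

lemma gcd_pos (N M : Int) (hN : 0 < N) : 0 < Int.gcd N M := by
  unfold Int.gcd
  have : N.natAbs ≠ 0 := by omega
  positivity

lemma L_pos (N M : Int) (hN : 0 < N) : 0 < N.toNat / Int.gcd N M := by
  apply Nat.div_pos _ (gcd_pos N M hN)
  rw [show N.toNat = N.natAbs by omega]
  exact Nat.le_of_dvd (by omega) (Int.gcd_dvd_natAbs_left N M)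

-- abstract description of A's array after k marking steps
def pvArr (N M : Int) (k : Nat) : List Int :=
  (List.range N.toNat).map
    (fun j => if ∃ i < k, (PySem.Int.mod ((i : Int) * M) N).toNat = j then (0 : Int) else 1)

lemma length_pvArr (N M : Int) (k : Nat) : (pvArr N M k).length = N.toNat := by
  simp [pvArr]

lemma pvArr_getElem (N M : Int) (k t : Nat) (h : t < (pvArr N M k).length) :
    (pvArr N M k)[t]
      = if ∃ i < k, (PySem.Int.mod ((i : Int) * M) N).toNat = t then (0 : Int) else 1 := by
  simp [pvArr]

lemma pvArr_zero (N M : Int) : pvArr N M 0 = List.replicate N.toNat 1 := by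
  simp [pvArr]

-- once the done flag is set the rest of the loop is a no-op
lemma foldl_done (N M : Int) (l : List Int) (A : List Int) (c : Int) :
    l.foldl (pvStep N M) (A, c, true) = (A, c, true) := by
  induction l with
  | nil => rfl
  | cons x xs ih => simpa [pvStep] using ih

-- two indices below N/gcd(N,M) never hit the same cell
lemma no_repeat (N M : Int) (hN : 0 < N) (i k : Nat) (hik : i < k)
    (hk : k < N.toNat / Int.gcd N M)
    (h : PySem.Int.mod ((i : Int) * M) N = PySem.Int.mod ((k : Int) * M) N) : False := by
  rw [PySem.Int.mod_eq_emod_of_pos hN, PySem.Int.mod_eq_emod_of_pos hN] at h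
  have h2 : ((i : Int) * M - (k : Int) * M) % N = 0 :=
    Int.emod_eq_emod_iff_emod_sub_eq_zero.mp h
  have h3 : (N : Int) ∣ (i : Int) * M - (k : Int) * M := Int.dvd_of_emod_eq_zero h2
  have h4 : (N : Int) ∣ ((k - i : Nat) : Int) * M := by
    have he : ((k - i : Nat) : Int) * M = -((i : Int) * M - (k : Int) * M) := by
      push_cast [Nat.cast_sub hik.le]
      ring
    rw [he]
    exact dvd_neg.mpr h3
  exact key_not_dvd N M hN (k - i) (by omega) (by omega) h4

-- loop invariant: for the first k ≤ N/gcd(N,M) steps no break occurs and counter = k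
lemma inv (N M : Int) (hN : 0 < N) (k : Nat) (hk : k ≤ N.toNat / Int.gcd N M) :
    (PySem.List.pyRange 0 (k : Int) 1).foldl (pvStep N M) (List.replicate N.toNat 1, 0, false)
      = (pvArr N M k, (k : Int), false) := by
  induction k with
  | zero =>
    rw [PySem.List.pyRange_one_eq_nil (by omega)]
    simp [pvArr_zero]
  | succ k ih =>
    have hkL : k < N.toNat / Int.gcd N M := by omega
    have hrange : PySem.List.pyRange 0 ((k : Int) + 1) 1
        = PySem.List.pyRange 0 (k : Int) 1 ++ [(k : Int)] :=
      PySem.List.pyRange_one_succ_right (by omega)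
    push_cast
    rw [hrange, List.foldl_append, ih (by omega)]
    set idx := PySem.Int.mod ((k : Int) * M) N with hidx
    have hidx0 : 0 ≤ idx := PySem.Int.mod_nonneg _ hN
    have hidxN : idx < N := PySem.Int.mod_lt _ hN
    have hlen : (pvArr N M k).length = N.toNat := length_pvArr N M k
    have hread : PySem.List.pyGetD (pvArr N M k) idx 0 = 1 := by
      rw [PySem.List.pyGetD_eq_getElem (pvArr N M k) 0 hidx0 (by rw [hlen]; omega)]
      rw [pvArr_getElem N M k idx.toNat (by rw [hlen]; omega)]
      rw [if_neg]
      intro ⟨i, hik, hieq⟩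
      have hm0 : 0 ≤ PySem.Int.mod ((i : Int) * M) N := PySem.Int.mod_nonneg _ hN
      exact no_repeat N M hN i k hik hkL (by omega)
    have hstep : pvStep N M (pvArr N M k, (k : Int), false) (k : Int)
        = (PySem.List.pySetD (pvArr N M k) idx 0, (k : Int) + 1, false) := by
      simp [pvStep, ← hidx, hread]
    rw [List.foldl_cons, List.foldl_nil, hstep]
    refine Prod.ext ?_ rfl
    -- the array after setting cell idx is pvArr (k+1)
    show PySem.List.pySetD (pvArr N M k) idx 0 = pvArr N M (k + 1)
    rw [PySem.List.pySetD_of_nonneg (pvArr N M k) 0 hidx0]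
    apply List.ext_getElem
    · rw [List.length_set, length_pvArr, length_pvArr]
    · intro j hj1 hj2
      have hjN : j < N.toNat := by rw [List.length_set, length_pvArr] at hj1; exact hj1
      rw [List.getElem_set]
      rw [pvArr_getElem N M (k + 1) j hj2]
      by_cases hje : idx.toNat = j
      · rw [if_pos hje, if_pos]
        exact ⟨k, by omega, by rw [← hidx, hje]⟩
      · rw [if_neg hje]
        rw [pvArr_getElem N M k j (by rw [length_pvArr]; exact hjN)]
        by_cases hex : ∃ i < k, (PySem.Int.mod ((i : Int) * M) N).toNat = j
        · rw [if_pos hex, if_pos]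
          obtain ⟨i, hik, hieq⟩ := hex
          exact ⟨i, by omega, hieq⟩
        · rw [if_neg hex, if_neg]
          intro ⟨i, hik, hieq⟩
          rcases Nat.lt_succ_iff_lt_or_eq.mp hik with hik' | rfl
          · exact hex ⟨i, hik', hieq⟩
          · rw [← hidx] at hieq
            exact hje hieq

-- A's result for positive N is N/gcd(N,M)
lemma solution_pos (N M : Int) (hN : 0 < N) :
    solution N M = ((N.toNat / Int.gcd N M : Nat) : Int) := by
  set L := N.toNat / Int.gcd N M with hLdef
  have hLpos : 0 < L := L_pos N M hN
  have hLn : L ≤ N.toNat := Nat.div_le_self _ _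
  unfold solution
  simp only [List.length_replicate]
  rcases eq_or_lt_of_le hLn with hEq | hLt
  · rw [show ((N.toNat : Nat) : Int) = ((L : Nat) : Int) by rw [hEq]]
    rw [inv N M hN L (le_refl _)]
  · have hsplit : PySem.List.pyRange 0 (N.toNat : Int) 1
        = PySem.List.pyRange 0 (L : Int) 1 ++ PySem.List.pyRange (L : Int) (N.toNat : Int) 1 :=
      PySem.List.pyRange_one_append 0 (L : Int) (N.toNat : Int) (by omega) (by omega)
    rw [hsplit, List.foldl_append, inv N M hN L (le_refl _)]
    rw [PySem.List.pyRange_one_cons (by exact_mod_cast hLt), List.foldl_cons]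
    have hmod0 : PySem.Int.mod ((L : Int) * M) N = 0 := by
      rw [PySem.Int.mod_eq_zero_iff_dvd]
      exact key_dvd N M hN
    have hread : PySem.List.pyGetD (pvArr N M L) (PySem.Int.mod ((L : Int) * M) N) 0 = 0 := by
      rw [hmod0]
      rw [PySem.List.pyGetD_eq_getElem (pvArr N M L) 0 (le_refl 0)
        (by rw [length_pvArr]; omega)]
      rw [pvArr_getElem N M L (0 : Int).toNat (by rw [length_pvArr]; omega)]
      rw [if_pos]
      refine ⟨0, hLpos, ?_⟩
      have hz : PySem.Int.mod 0 N = 0 := by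
        rw [PySem.Int.mod_eq_zero_iff_dvd]
        exact dvd_zero N
      simp [hz]
    have hstep : pvStep N M (pvArr N M L, (L : Int), false) (L : Int)
        = (pvArr N M L, (L : Int), true) := by
      simp [pvStep, hread]
    rw [hstep, foldl_done]

-- ===== VERDICT (by name: the statement is the Claim_ definition above) =====
theorem solution_spec : Claim_equal_solution := by
  intro N M _
  unfold Spec_solution solution_alt
  by_cases hN : N ≤ 0
  · simp only [if_pos hN, solution]
    have h0 : N.toNat = 0 := by omega
    simp [h0]
  · push Not at hN
    rw [if_neg (by omega)]
    rw [solution_pos N M hN]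
    rw [gcdLoop_eq N |M| (le_of_lt hN) (abs_nonneg M)]
    have hg : Int.gcd N |M| = Int.gcd N M := by
      simp [Int.gcd, Int.natAbs_abs]
    rw [hg]
    conv_rhs => rw [show N = ((N.toNat : Nat) : Int) by omega]
    rw [PySem.Int.floordiv_natCast]
    simp [Int.toNat_of_nonneg hN.le]
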